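-- pv_equiv track=rewrite | github.com/CarlaBuongiorno/small-python-exercises | items_match.py | items_match
-- ===== SOURCE A (Python) =====
-- def items_match(input_list):
--     count = 0
--     if len(input_list) > 1 and input_list[-1] == input_list[0]:
--         count += 1
--     for i, item in enumerate(input_list):
--         if i + 1 < len(input_list) and item == input_list[i+1]:
--             count += 1
--     return count
-- ===== SOURCE B (Python) =====
-- def items_match(input_list):
--     n = len(input_list)
--     if n < 2:
--         return 0
--     # run-length encode the list, then use: adjacent equal pairs = sum(run_len - 1)
--     runs = []
--     cur_val, cur_cnt = input_list[0], 1
--     for x in input_list[1:]: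
--         if x == cur_val:
--             cur_cnt += 1
--         else:
--             runs.append((cur_val, cur_cnt))
--             cur_val, cur_cnt = x, 1
--     runs.append((cur_val, cur_cnt))
--     total = sum(c - 1 for _, c in runs)
--     if input_list[0] == input_list[-1]:
--         total += 1
--     return total
-- ===== Notes on version B (the rewrite author's own statement) =====
-- stated objective: alternative
-- what changed: B compresses the list into a run-length encoding (value, run-length pairs) and computes the answer arithmetically as sum(run_len - 1) over the runs plus the wraparound edge, instead of A's wraparound pre-check followed by a guarded index-lookup loop counting equal neighbours.
import Mathlib
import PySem

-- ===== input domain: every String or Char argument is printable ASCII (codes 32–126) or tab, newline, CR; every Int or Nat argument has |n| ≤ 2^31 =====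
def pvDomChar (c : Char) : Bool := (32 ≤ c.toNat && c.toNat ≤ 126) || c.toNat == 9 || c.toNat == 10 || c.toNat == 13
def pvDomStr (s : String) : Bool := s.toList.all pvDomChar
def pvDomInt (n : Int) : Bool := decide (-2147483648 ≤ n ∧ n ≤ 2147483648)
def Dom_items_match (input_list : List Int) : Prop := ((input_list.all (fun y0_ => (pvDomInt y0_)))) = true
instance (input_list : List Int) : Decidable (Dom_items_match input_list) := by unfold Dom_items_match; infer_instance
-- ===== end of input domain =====

-- B replaces A's wraparound pre-check plus guarded index-lookup loop by a run-length
-- encoding: it compresses the list into (value, run-length) pairs, sums (len-1) over the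
-- runs, and adds the wraparound edge (objective: alternative, same O(n) cost).


-- ===== PORT A =====
-- count = 0; if len>1 and l[-1]==l[0]: count+=1; for i,item in enumerate(l): if i+1<len and item==l[i+1]: count+=1
def items_match (input_list : List Int) : Int :=
  let count : Int :=
    if 1 < (input_list.length : Int) ∧
        PySem.List.pyGetD input_list (-1) 0 = PySem.List.pyGetD input_list 0 0 then 1 else 0
  (PySem.List.enumerate input_list 0).foldl
    (fun c p =>
      if p.1 + 1 < (input_list.length : Int) ∧
          p.2 = PySem.List.pyGetD input_list (p.1 + 1) 0 then c + 1 else c)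
    count

-- ===== PORT B =====
-- n = len(l); if n < 2: return 0
-- runs = []; cur_val, cur_cnt = l[0], 1
-- for x in l[1:]: if x == cur_val: cur_cnt += 1 else: runs.append((cur_val, cur_cnt)); cur_val, cur_cnt = x, 1
-- runs.append((cur_val, cur_cnt)); total = sum(c - 1 for _, c in runs); if l[0] == l[-1]: total += 1
def items_match_alt (input_list : List Int) : Int :=
  let n : Int := (input_list.length : Int)
  if n < 2 then 0
  else
    let st := (PySem.List.slice input_list (some 1) none).foldl
      (fun (s : List (Int × Int) × Int × Int) x =>
        if x = s.2.1 then (s.1, s.2.1, s.2.2 + 1)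
        else (s.1 ++ [(s.2.1, s.2.2)], x, 1))
      (([] : List (Int × Int)), PySem.List.pyGetD input_list 0 0, (1 : Int))
    let runs := st.1 ++ [(st.2.1, st.2.2)]
    let total := (runs.map (fun p => p.2 - 1)).sum
    if PySem.List.pyGetD input_list 0 0 = PySem.List.pyGetD input_list (-1) 0 then
      total + 1
    else total

-- ===== PRECONDITION & SPEC =====
def Spec_items_match (input_list : List Int) (out : Int) : Prop := out = items_match_alt input_list
instance (input_list : List Int) (out : Int) : Decidable (Spec_items_match input_list out) := by unfold Spec_items_match; infer_instance

-- ===== CLAIM =====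
def Claim_equal_items_match : Prop := ∀ (input_list : List Int), Dom_items_match input_list → Spec_items_match input_list (items_match input_list)

-- ===== LEMMAS AND PROOFS =====

-- number of adjacent equal pairs (no wraparound)
def pvAdj : List Int → Int
  | [] => 0
  | [_] => 0
  | a :: b :: t => (if a = b then 1 else 0) + pvAdj (b :: t)

-- indexing into the middle of an append
theorem pvGetD_append_cons (pre : List Int) (x : Int) (suf : List Int) :
    PySem.List.pyGetD (pre ++ x :: suf) (pre.length : Int) 0 = x := by
  simp [PySem.List.pyGetD_natCast, List.getD]

theorem pvGetD_append_cons' (pre : List Int) (x y : Int) (suf : List Int) :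
    PySem.List.pyGetD (pre ++ x :: y :: suf) ((pre.length : Int) + 1) 0 = y := by
  have h := pvGetD_append_cons (pre ++ [x]) y suf
  simpa [List.append_assoc] using h

-- A's loop over a suffix equals the accumulator plus the adjacent count of the suffix
theorem pvLoopA (l : List Int) :
    ∀ (suf pre : List Int) (c : Int), l = pre ++ suf →
    (PySem.List.enumerate suf (pre.length : Int)).foldl
      (fun c p =>
        if p.1 + 1 < (l.length : Int) ∧
            p.2 = PySem.List.pyGetD l (p.1 + 1) 0 then c + 1 else c)
      c = c + pvAdj suf := by
  intro suf
  induction suf with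
  | nil => intro pre c h; simp [PySem.List.enumerate_nil, pvAdj]
  | cons x rest ih =>
    intro pre c h
    rw [PySem.List.enumerate_cons]
    simp only [List.foldl_cons]
    have hrec := ih (pre ++ [x])
      (if ((pre.length : Int) + 1 < (l.length : Int) ∧
          x = PySem.List.pyGetD l ((pre.length : Int) + 1) 0) then c + 1 else c)
      (by simp [h, List.append_assoc])
    rw [show ((pre ++ [x]).length : Int) = (pre.length : Int) + 1 by simp] at hrec
    rw [hrec]
    cases rest with
    | nil =>
      have hfalse : ¬ ((pre.length : Int) + 1 < (l.length : Int)) := by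
        subst h; simp
      simp [hfalse, pvAdj]
    | cons y t =>
      have hlen : (pre.length : Int) + 1 < (l.length : Int) := by
        subst h; simp
      have hget : PySem.List.pyGetD l ((pre.length : Int) + 1) 0 = y := by
        subst h; exact pvGetD_append_cons' pre x y t
      by_cases hxy : x = y
      · simp [hlen, hget, hxy, pvAdj]; ring
      · simp [hlen, hget, hxy, pvAdj]

theorem pvLoopA0 (l : List Int) (c : Int) :
    (PySem.List.enumerate l 0).foldl
      (fun c p =>
        if p.1 + 1 < (l.length : Int) ∧
            p.2 = PySem.List.pyGetD l (p.1 + 1) 0 then c + 1 else c)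
      c = c + pvAdj l :=
  pvLoopA l l [] c (by simp)

-- B's run-length fold: the sum of (run length - 1) over the final runs equals the
-- accumulated sum plus the adjacent-pair count of cur_val :: remaining-input
theorem pvFoldRLE :
    ∀ (suf : List Int) (runs : List (Int × Int)) (v c : Int),
    (let st := suf.foldl
        (fun (s : List (Int × Int) × Int × Int) x =>
          if x = s.2.1 then (s.1, s.2.1, s.2.2 + 1)
          else (s.1 ++ [(s.2.1, s.2.2)], x, 1))
        (runs, v, c)
     ((st.1 ++ [(st.2.1, st.2.2)]).map (fun p => p.2 - 1)).sum)
    = (runs.map (fun p => p.2 - 1)).sum + (c - 1) + pvAdj (v :: suf) := by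
  intro suf
  induction suf with
  | nil => intro runs v c; simp [pvAdj]
  | cons x rest ih =>
    intro runs v c
    simp only [List.foldl_cons]
    by_cases hxv : x = v
    · have h := ih runs v (c + 1)
      simp only [if_pos hxv] at *
      rw [h]
      subst hxv
      simp [pvAdj]; ring
    · have h := ih (runs ++ [(v, c)]) x 1
      simp only [if_neg hxv] at *
      rw [h]
      have hvx : ¬ v = x := fun h' => hxv h'.symm
      simp [pvAdj, hvx]

-- ===== VERDICT =====
theorem items_match_spec : Claim_equal_items_match := by
  intro l _
  unfold Spec_items_match items_match items_match_alt
  simp only []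
  rw [pvLoopA0]
  by_cases hsmall : (l.length : Int) < 2
  · -- short lists: both sides are 0
    have hwrap : ¬ (1 < (l.length : Int) ∧
        PySem.List.pyGetD l (-1) 0 = PySem.List.pyGetD l 0 0) := by
      intro ⟨h1, _⟩; omega
    have hadj : pvAdj l = 0 := by
      match l, hsmall with
      | [], _ => rfl
      | [_], _ => rfl
      | a :: b :: t, hsmall => exfalso; simp only [List.length_cons] at hsmall; push_cast at hsmall; omega
    have hwrapn : ¬ 1 < l.length := by omega
    simp [hwrapn, hadj, hsmall]
  · -- n ≥ 2 : l = a :: rest with rest ≠ []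
    rw [if_neg hsmall]
    match l, hsmall with
    | a :: rest, hsmall =>
      have htail : PySem.List.slice (a :: rest) (some 1) none = rest := by
        simp [PySem.List.slice_from_one]
      have hhead : PySem.List.pyGetD (a :: rest) 0 0 = a := by
        simp [PySem.List.pyGetD]
      rw [htail, hhead]
      have h := pvFoldRLE rest [] a 1
      simp only [] at h
      rw [h]
      simp only [List.map_nil, List.sum_nil]
      by_cases hw : a = PySem.List.pyGetD (a :: rest) (-1) 0
      · have h1 : 1 < ((a :: rest).length : Int) := by omega
        rw [if_pos ⟨h1, hw.symm⟩, if_pos hw]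
        ring
      · rw [if_neg (fun hp => hw hp.2.symm), if_neg hw]
        ring
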